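-- pv_equiv track=rewrite | github.com/ryanbrate/TomesForTheTimes | Tuples/tuple_fetcher.py | get_ordered_idxs
-- ===== SOURCE A (Python) =====
-- from collections import deque
--
-- def get_ordered_idxs(parse_s: dict) -> list[int]:
--     """Return a list of parse_s idxs in order of top to bottom of the tree.
--
--         Note: ignores idx 0 (i.e., fakeroot)
--
--     Args:
--         parse_s (dict) : a tree of head::int->deps::list[int]
--                          has a fakeroot idx=0, whose dependent is the real root
--     """
--
--     # accumulator
--     ordered_idxs = []
--
--     # state
--     last = deque([0])
--
--     while len(last) > 0:
--
--         idx = last.pop()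
--         if idx != 0:
--             ordered_idxs.append(idx)
--         if idx in parse_s.keys():
--             for child_idx in parse_s[idx]:
--                 last.appendleft(child_idx)  # append to left
--
--     return ordered_idxs
-- ===== SOURCE B (Python) =====
-- def get_ordered_idxs(parse_s: dict) -> list[int]:
--     """Return a list of parse_s idxs in order of top to bottom of the tree.
--
--     Same traversal as A (top-to-bottom, left-to-right), but by explicit
--     per-level frontier batching with plain lists instead of a deque.
--     """
--     ordered_idxs = []
--     frontier = [0]
--     while frontier:
--         next_level = []
--         for idx in frontier:
--             if idx != 0:
--                 ordered_idxs.append(idx)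
--             next_level.extend(parse_s.get(idx, []))
--         frontier = next_level
--     return ordered_idxs
-- ===== Notes on version B (the rewrite author's own statement) =====
-- stated objective: simpler
-- what changed: Replaces the deque-based FIFO traversal with explicit per-level frontier batching: plain lists, no collections import, and the level structure of the top-to-bottom order made explicit; Pre_ excludes only inputs on which A's while-loop never terminates (a cycle reachable from the fakeroot).
import Mathlib
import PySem

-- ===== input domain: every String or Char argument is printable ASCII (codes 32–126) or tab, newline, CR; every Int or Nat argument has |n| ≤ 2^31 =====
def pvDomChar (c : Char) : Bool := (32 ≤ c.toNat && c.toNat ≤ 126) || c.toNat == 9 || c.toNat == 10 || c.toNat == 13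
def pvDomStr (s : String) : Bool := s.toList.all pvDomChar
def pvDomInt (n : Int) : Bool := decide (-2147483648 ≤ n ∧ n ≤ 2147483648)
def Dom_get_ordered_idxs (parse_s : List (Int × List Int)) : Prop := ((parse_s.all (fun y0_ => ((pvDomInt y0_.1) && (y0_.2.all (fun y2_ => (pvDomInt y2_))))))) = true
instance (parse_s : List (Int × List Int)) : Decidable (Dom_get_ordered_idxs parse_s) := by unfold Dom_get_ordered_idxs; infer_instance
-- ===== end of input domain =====

-- B replaces A's deque-based FIFO loop by per-level frontier batching (plain lists).

-- ===== PORT A =====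
-- dict first-match lookup ('idx in parse_s.keys()' + 'parse_s[idx]' / 'parse_s.get(idx, [])'); exact for a Python dict
def pvLookup : List (Int × List Int) → Int → Option (List Int)
  | [], _ => none
  | (k, v) :: rest, x => if k = x then some v else pvLookup rest x

-- the children of a node in the lookup graph ('parse_s.get(idx, [])')
def pvSucc (p : List (Int × List Int)) (x : Int) : List Int := (pvLookup p x).getD []

-- every dependency chain from x has at most k edges (bounded depth in the lookup graph)
def pvDepthOK (p : List (Int × List Int)) : Nat → Int → Bool
  | 0, x => pvSucc p x == []
  | k + 1, x => (pvSucc p x).all (pvDepthOK p k)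

-- pvW p k x = number of chain prefixes from x of length ≤ k = exact number of dequeues A performs
def pvW (p : List (Int × List Int)) : Nat → Int → Nat
  | 0, _ => 1
  | k + 1, x => 1 + ((pvSucc p x).map (pvW p k)).sum

-- fuel: one unit per loop iteration; under Pre_ it is proved sufficient (lemmas below)
def pvFuel (p : List (Int × List Int)) : Nat := pvW p (p.length + 1) 0

-- the deque, popped at the right and extended at the left, is represented FIFO-style:
-- head of the list = next element popped, children appended at the tail (same order)
def pvARun (p : List (Int × List Int)) : Nat → List Int → List Int → List Int
  | _, [], acc => acc
  | 0, _ :: _, acc => acc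
  | f + 1, idx :: q, acc =>
      let acc' := if idx ≠ 0 then acc ++ [idx] else acc
      let q' := match pvLookup p idx with
        | some ch => q ++ ch
        | none => q
      pvARun p f q' acc'

def get_ordered_idxs (parse_s : List (Int × List Int)) : List Int :=
  pvARun parse_s (pvFuel parse_s) [0] []

-- ===== PORT B =====
-- one inner 'for idx in frontier' pass: appends idx to the result, extends next_level with parse_s.get(idx, [])
def pvBStep (p : List (Int × List Int)) (st : List Int × List Int) (idx : Int) : List Int × List Int :=
  (if idx ≠ 0 then st.1 ++ [idx] else st.1, st.2 ++ (pvLookup p idx).getD [])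

def pvBRun (p : List (Int × List Int)) : Nat → List Int → List Int → List Int
  | _, [], res => res
  | 0, _ :: _, res => res
  | f + 1, idx :: frontier, res =>
      let st := (idx :: frontier).foldl (pvBStep p) (res, [])
      pvBRun p f st.2 st.1

def get_ordered_idxs_alt (parse_s : List (Int × List Int)) : List Int :=
  pvBRun parse_s (pvFuel parse_s) [0] []

-- ===== PRECONDITION & SPEC =====
-- Pre_ holds exactly when every dependency chain from the fakeroot 0 has at most len(parse_s)+1 edges,
-- i.e. exactly when no cycle is reachable from idx 0: on every excluded input A's while-loop re-enqueues
-- nodes forever and never returns (B diverges there too), so Pre_ excludes no input on which A returns.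
def Pre_get_ordered_idxs (parse_s : List (Int × List Int)) : Prop :=
  pvDepthOK parse_s (parse_s.length + 1) 0 = true

instance (parse_s : List (Int × List Int)) : Decidable (Pre_get_ordered_idxs parse_s) := by
  unfold Pre_get_ordered_idxs; infer_instance

def pvWitness_get_ordered_idxs : (List (Int × List Int)) := [(0, [2]), (2, [1, 3]), (3, [4, 5])]

def Spec_get_ordered_idxs (parse_s : List (Int × List Int)) (out : List Int) : Prop := out = get_ordered_idxs_alt parse_s
instance (parse_s : List (Int × List Int)) (out : List Int) : Decidable (Spec_get_ordered_idxs parse_s out) := by unfold Spec_get_ordered_idxs; infer_instance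

-- ===== CLAIM (what is proved, stated in full; the proofs are below) =====
def Claim_equal_get_ordered_idxs : Prop := ∀ (parse_s : List (Int × List Int)), Dom_get_ordered_idxs parse_s → Pre_get_ordered_idxs parse_s → Spec_get_ordered_idxs parse_s (get_ordered_idxs parse_s)

-- ===== LEMMAS AND PROOFS =====

-- option-valued variants (proof-side only): 'none' = fuel exhausted with work remaining
def pvAO (p : List (Int × List Int)) : Nat → List Int → List Int → Option (List Int)
  | _, [], acc => some acc
  | 0, _ :: _, _ => none
  | f + 1, idx :: q, acc =>
      pvAO p f (match pvLookup p idx with | some ch => q ++ ch | none => q)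
        (if idx ≠ 0 then acc ++ [idx] else acc)

def pvBO (p : List (Int × List Int)) : Nat → List Int → List Int → Option (List Int)
  | _, [], res => some res
  | 0, _ :: _, _ => none
  | f + 1, idx :: frontier, res =>
      pvBO p f (((idx :: frontier).foldl (pvBStep p) (res, [])).2)
        (((idx :: frontier).foldl (pvBStep p) (res, [])).1)

theorem pvAO_run {p : List (Int × List Int)} : ∀ {f q acc r}, pvAO p f q acc = some r → pvARun p f q acc = r := by
  intro f q acc r h
  induction f generalizing q acc with
  | zero =>
    cases q with
    | nil => simp [pvAO] at h; simpa [pvARun] using h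
    | cons a t => simp [pvAO] at h
  | succ f ih =>
    cases q with
    | nil => simp [pvAO] at h; simpa [pvARun] using h
    | cons a t => exact ih h

theorem pvBO_run {p : List (Int × List Int)} : ∀ {f fr res r}, pvBO p f fr res = some r → pvBRun p f fr res = r := by
  intro f fr res r h
  induction f generalizing fr res with
  | zero =>
    cases fr with
    | nil => simp [pvBO] at h; simpa [pvBRun] using h
    | cons a t => simp [pvBO] at h
  | succ f ih =>
    cases fr with
    | nil => simp [pvBO] at h; simpa [pvBRun] using h
    | cons a t => exact ih h

theorem pvBO_mono {p : List (Int × List Int)} : ∀ {f f' fr res r}, f ≤ f' → pvBO p f fr res = some r → pvBO p f' fr res = some r := by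
  intro f f' fr res r hle h
  induction f generalizing f' fr res with
  | zero =>
    cases fr with
    | nil => simp [pvBO] at h; simp [pvBO, h]
    | cons a t => simp [pvBO] at h
  | succ f ih =>
    cases fr with
    | nil => simp [pvBO] at h; simp [pvBO, h]
    | cons a t =>
      cases f' with
      | zero => omega
      | succ f'' =>
        have h' : pvBO p f (((a :: t).foldl (pvBStep p) (res, [])).2)
            (((a :: t).foldl (pvBStep p) (res, [])).1) = some r := h
        exact ih (f' := f'') (by omega) h'

-- correspondence: an A-run on 'rest ++ next' equals B finishing the current level 'rest' (partial next level 'next')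
theorem pvA_to_B {p : List (Int × List Int)} :
    ∀ f rest next res r, pvAO p f (rest ++ next) res = some r →
      ∃ g ≤ f, pvBO p g (rest.foldl (pvBStep p) (res, next)).2 (rest.foldl (pvBStep p) (res, next)).1 = some r := by
  intro f
  induction f with
  | zero =>
    intro rest next res r h
    cases rest with
    | cons idx rest' => simp [pvAO] at h
    | nil =>
      cases next with
      | cons idx next' => simp [pvAO] at h
      | nil =>
        simp [pvAO] at h
        exact ⟨0, Nat.le_refl 0, by simp [pvBO, h]⟩
  | succ f ih =>
    intro rest next res r h
    cases rest with
    | cons idx rest' =>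
      rcases hL : pvLookup p idx with _ | ch
      · have h' : pvAO p f (rest' ++ next) (if idx ≠ 0 then res ++ [idx] else res) = some r := by
          simpa only [List.cons_append, pvAO, hL] using h
        obtain ⟨g, hg, hB⟩ := ih rest' next (if idx ≠ 0 then res ++ [idx] else res) r h'
        refine ⟨g, Nat.le_succ_of_le hg, ?_⟩
        simpa only [List.foldl_cons, pvBStep, hL, Option.getD_none, List.append_nil] using hB
      · have h' : pvAO p f (rest' ++ (next ++ ch)) (if idx ≠ 0 then res ++ [idx] else res) = some r := by
          have := h
          simp only [List.cons_append, pvAO, hL] at this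
          simpa only [List.append_assoc] using this
        obtain ⟨g, hg, hB⟩ := ih rest' (next ++ ch) (if idx ≠ 0 then res ++ [idx] else res) r h'
        refine ⟨g, Nat.le_succ_of_le hg, ?_⟩
        simpa only [List.foldl_cons, pvBStep, hL, Option.getD_some] using hB
    | nil =>
      cases next with
      | nil =>
        simp [pvAO] at h
        exact ⟨0, Nat.zero_le _, by simp [pvBO, h]⟩
      | cons idx next' =>
        rcases hL : pvLookup p idx with _ | ch
        · have h' : pvAO p f (next' ++ []) (if idx ≠ 0 then res ++ [idx] else res) = some r := by
            simpa only [List.nil_append, pvAO, hL, List.append_nil] using h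
          obtain ⟨g, hg, hB⟩ := ih next' [] (if idx ≠ 0 then res ++ [idx] else res) r h'
          refine ⟨g + 1, Nat.succ_le_succ hg, ?_⟩
          simp only [List.foldl_nil, pvBO]
          simpa only [List.foldl_cons, pvBStep, hL, Option.getD_none, List.append_nil] using hB
        · have h' : pvAO p f (next' ++ ch) (if idx ≠ 0 then res ++ [idx] else res) = some r := by
            simpa only [List.nil_append, pvAO, hL] using h
          obtain ⟨g, hg, hB⟩ := ih next' ch (if idx ≠ 0 then res ++ [idx] else res) r h'
          refine ⟨g + 1, Nat.succ_le_succ hg, ?_⟩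
          simp only [List.foldl_nil, pvBO]
          simpa only [List.foldl_cons, pvBStep, hL, Option.getD_some, List.nil_append] using hB

-- ===== termination of A under Pre_ =====

theorem pvW_pos {p : List (Int × List Int)} {k : Nat} {x : Int} : 1 ≤ pvW p k x := by
  cases k <;> simp [pvW]

-- a queue whose every element has bounded depth is fully processed with fuel = sum of its path counts
theorem pvA_term {p : List (Int × List Int)} :
    ∀ f (qd : List (Int × Nat)) acc,
      (∀ e ∈ qd, pvDepthOK p e.2 e.1 = true) →
      (qd.map (fun e => pvW p e.2 e.1)).sum ≤ f →
      ∃ r, pvAO p f (qd.map Prod.fst) acc = some r := by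
  intro f
  induction f with
  | zero =>
    intro qd acc _ hlen
    cases qd with
    | nil => exact ⟨acc, rfl⟩
    | cons e t =>
      exfalso
      simp only [List.map_cons, List.sum_cons, Nat.le_zero] at hlen
      have := pvW_pos (p := p) (k := e.2) (x := e.1)
      omega
  | succ f ih =>
    intro qd acc hok hlen
    cases qd with
    | nil => exact ⟨acc, rfl⟩
    | cons e t =>
      obtain ⟨idx, k⟩ := e
      have hD : pvDepthOK p k idx = true := hok _ List.mem_cons_self
      have hrestok : ∀ e ∈ t, pvDepthOK p e.2 e.1 = true := fun e he => hok e (List.mem_cons_of_mem _ he)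
      -- the A-step queue is 't.map fst ++ pvSucc p idx' in both lookup branches
      have hq : (match pvLookup p idx with
          | some ch => t.map Prod.fst ++ ch
          | none => t.map Prod.fst) = t.map Prod.fst ++ pvSucc p idx := by
        rcases hL : pvLookup p idx with _ | ch <;> simp [pvSucc, hL]
      cases k with
      | zero =>
        have hempty : pvSucc p idx = [] := by simpa [pvDepthOK] using hD
        obtain ⟨r, hr⟩ := ih t (if idx ≠ 0 then acc ++ [idx] else acc) hrestok
          (by simp only [List.map_cons, List.sum_cons, pvW] at hlen ⊢; omega)
        refine ⟨r, ?_⟩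
        simp only [List.map_cons, pvAO]
        rw [hq, hempty, List.append_nil]
        exact hr
      | succ k' =>
        have hch : ∀ c ∈ pvSucc p idx, pvDepthOK p k' c = true := by
          simpa [pvDepthOK, List.all_eq_true] using hD
        obtain ⟨r, hr⟩ := ih (t ++ (pvSucc p idx).map (fun c => (c, k')))
          (if idx ≠ 0 then acc ++ [idx] else acc)
          (by
            intro e he
            rcases List.mem_append.mp he with he | he
            · exact hrestok e he
            · obtain ⟨c, hc, rfl⟩ := List.mem_map.mp he
              exact hch c hc)
          (by
            simp only [List.map_cons, List.sum_cons, pvW, List.map_append, List.sum_append,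
              List.map_map] at hlen ⊢
            have hsum : ((pvSucc p idx).map ((fun e => pvW p e.2 e.1) ∘ fun c => (c, k'))).sum
                = ((pvSucc p idx).map (pvW p k')).sum := by
              congr 1
            omega)
        refine ⟨r, ?_⟩
        simp only [List.map_cons, pvAO]
        rw [hq]
        have hmap : (t ++ (pvSucc p idx).map (fun c => (c, k'))).map Prod.fst
            = t.map Prod.fst ++ pvSucc p idx := by
          simp [List.map_append, List.map_map, Function.comp_def]
        rw [← hmap]
        exact hr

theorem pvA_total (p : List (Int × List Int)) (hpre : Pre_get_ordered_idxs p) :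
    ∃ r, pvAO p (pvFuel p) [0] [] = some r := by
  have := pvA_term (p := p) (pvFuel p) [(0, p.length + 1)] []
    (by intro e he; simp only [List.mem_singleton] at he; subst he; exact hpre)
    (by simp [pvFuel])
  simpa using this

-- ===== VERDICT (by name: the statement is the Claim_ definition above) =====
theorem get_ordered_idxs_spec : Claim_equal_get_ordered_idxs := by
  intro p _ hpre
  obtain ⟨r, hA⟩ := pvA_total p hpre
  obtain ⟨g, hg, hB⟩ := pvA_to_B (pvFuel p) [] [0] [] r hA
  simp only [List.foldl_nil] at hB
  have hBN := pvBO_mono hg hB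
  unfold Spec_get_ordered_idxs get_ordered_idxs get_ordered_idxs_alt
  rw [pvAO_run hA, pvBO_run hBN]
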